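-- pv_equiv track=rewrite | github.com/kuzmiigo/advent-of-code | 2019/17/prog.py | find_alignments
-- ===== SOURCE A (Python) =====
-- deltas = {
--     'L': (-1, 0),
--     'R': (1, 0),
--     'U': (0, -1),
--     'D': (0, 1)
-- }
--
-- def find_alignments(screen):
--     scaffold = set(screen.keys())
--     intersections = []
--     for s in scaffold:
--         x, y = s
--         n = [(x + dx, y + dy) for dx, dy in deltas.values()]
--         if len(scaffold.intersection(n)) > 2:
--             intersections.append(s)
--     return sum([x * y for x, y in intersections])
-- ===== SOURCE B (Python) =====
-- DELTAS = ((-1, 0), (1, 0), (0, -1), (0, 1))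
--
--
-- def find_alignments(screen):
--     # Scatter pass: count[c] = number of scaffold cells adjacent to c.
--     count = {}
--     for x, y in screen:
--         for dx, dy in DELTAS:
--             c = (x + dx, y + dy)
--             count[c] = count.get(c, 0) + 1
--     # Selection pass: sum x*y over scaffold cells with more than 2 neighbors.
--     return sum(x * y for x, y in screen if count.get((x, y), 0) > 2)
-- ===== Notes on version B (the rewrite author's own statement) =====
-- stated objective: alternative
-- what changed: Instead of gathering each cell's four neighbors and intersecting them with the scaffold set, B makes one scatter pass that increments a dictionary counter at every neighbor of every scaffold cell, then a selection pass summing x*y over scaffold cells whose counter exceeds 2.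
import Mathlib
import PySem

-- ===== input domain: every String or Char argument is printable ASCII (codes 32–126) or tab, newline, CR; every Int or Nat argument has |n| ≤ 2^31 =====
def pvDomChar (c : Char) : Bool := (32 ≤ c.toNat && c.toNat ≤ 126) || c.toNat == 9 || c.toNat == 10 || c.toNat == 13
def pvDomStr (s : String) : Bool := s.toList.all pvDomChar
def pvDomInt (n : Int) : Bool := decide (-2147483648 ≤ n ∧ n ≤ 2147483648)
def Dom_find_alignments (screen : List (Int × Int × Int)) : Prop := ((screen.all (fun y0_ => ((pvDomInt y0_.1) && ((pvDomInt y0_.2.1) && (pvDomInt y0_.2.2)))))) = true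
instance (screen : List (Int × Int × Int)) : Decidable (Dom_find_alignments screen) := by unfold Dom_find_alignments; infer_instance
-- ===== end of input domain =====

-- B replaces A's per-cell neighbor-gathering against the scaffold set by one scatter pass that
-- counts, in a dictionary, how many scaffold cells are adjacent to each point, followed by a
-- selection pass over the scaffold (objective: alternative decomposition, same asymptotic cost).

-- ===== PORT A =====
-- dict `screen : dict[(int,int), int]` is the assoc list of (x, y, value); its keys are (x, y).
def deltas : PySem.Dict String (Int × Int) :=
  PySem.Dict.ofList [("L", (-1, 0)), ("R", (1, 0)), ("U", (0, -1)), ("D", (0, 1))]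

def find_alignments (screen : List (Int × Int × Int)) : Int :=
  let scaffold : PySem.Set (Int × Int) :=
    PySem.Set.ofList (screen.map (fun e => (e.1, e.2.1)))
  -- iteration over the set `scaffold`: the final sum is independent of the iteration order
  let intersections : List (Int × Int) := scaffold.foldl (fun acc s =>
    let n := (PySem.Dict.values deltas).map (fun d => (s.1 + d.1, s.2 + d.2))
    if (PySem.Set.inter scaffold n).length > 2 then acc ++ [s] else acc) []
  (intersections.map (fun p => p.1 * p.2)).sum

-- ===== PORT B =====
def DELTAS : List (Int × Int) := [(-1, 0), (1, 0), (0, -1), (0, 1)]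

def find_alignments_alt (screen : List (Int × Int × Int)) : Int :=
  -- `for x, y in screen` iterates the dict's (distinct) keys in insertion order
  let keys : List (Int × Int) := PySem.List.dedup (screen.map (fun e => (e.1, e.2.1)))
  let count : PySem.Dict (Int × Int) Int := keys.foldl (fun d s =>
    DELTAS.foldl (fun d p =>
      let c := (s.1 + p.1, s.2 + p.2)
      d.insert c (d.getD c 0 + 1)) d) PySem.Dict.empty
  keys.foldl (fun acc s => if count.getD s 0 > 2 then acc + s.1 * s.2 else acc) 0

-- ===== PRECONDITION & SPEC =====
def Spec_find_alignments (screen : List (Int × Int × Int)) (out : Int) : Prop := out = find_alignments_alt screen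
instance (screen : List (Int × Int × Int)) (out : Int) : Decidable (Spec_find_alignments screen out) := by unfold Spec_find_alignments; infer_instance

-- ===== CLAIM (what is proved, stated in full; the proofs are below) =====
def Claim_equal_find_alignments : Prop := ∀ (screen : List (Int × Int × Int)), Dom_find_alignments screen → Spec_find_alignments screen (find_alignments screen)

-- ===== LEMMAS AND PROOFS =====

-- the neighbor list of a cell, shared shape of both ports' computations
def nbrsOf (s : Int × Int) : List (Int × Int) :=
  [(s.1 + -1, s.2 + 0), (s.1 + 1, s.2 + 0), (s.1 + 0, s.2 + -1), (s.1 + 0, s.2 + 1)]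

theorem nbrs_A (s : Int × Int) :
    (PySem.Dict.values deltas).map (fun d => (s.1 + d.1, s.2 + d.2)) = nbrsOf s := by
  rfl

theorem nbrs_symm (s t : Int × Int) : t ∈ nbrsOf s ↔ s ∈ nbrsOf t := by
  rcases s with ⟨a, b⟩; rcases t with ⟨u, v⟩
  simp [nbrsOf, Prod.ext_iff]
  omega

theorem count_nbrs (t c : Int × Int) :
    ((nbrsOf t).count c : Int) = if c ∈ nbrsOf t then 1 else 0 := by
  rcases t with ⟨a, b⟩; rcases c with ⟨u, v⟩
  simp [nbrsOf, List.count_cons, Prod.ext_iff]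
  split_ifs <;> omega

-- the dictionary built by B's scatter loop counts the scaffold neighbors of each point
theorem count_spec (K : List (Int × Int)) (d : PySem.Dict (Int × Int) Int) (c : Int × Int) :
    (K.foldl (fun d s =>
      DELTAS.foldl (fun d p =>
        let pt := (s.1 + p.1, s.2 + p.2)
        d.insert pt (d.getD pt 0 + 1)) d) d).getD c 0
    = d.getD c 0 + (K.countP (fun t => decide (c ∈ nbrsOf t)) : Int) := by
  induction K generalizing d with
  | nil => simp
  | cons t K ih =>
    rw [List.foldl_cons, ih]
    have hinner : DELTAS.foldl (fun d p =>
        let pt := (t.1 + p.1, t.2 + p.2)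
        d.insert pt (d.getD pt 0 + 1)) d
        = (nbrsOf t).foldl (fun d pt => d.insert pt (d.getD pt 0 + 1)) d := by
      rfl
    rw [hinner, PySem.Dict.getD_foldl_insert_add_one, count_nbrs]
    rw [List.countP_cons]
    by_cases h : c ∈ nbrsOf t <;> simp [h] <;> ring

theorem inter_length (K : List (Int × Int)) (n : List (Int × Int)) :
    (PySem.Set.inter K n).length = K.countP (fun t => decide (t ∈ n)) := by
  simp [PySem.Set.inter, List.countP_eq_length_filter]

theorem foldl_if_add (l : List (Int × Int)) (p : Int × Int → Prop) [DecidablePred p]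
    (g : Int × Int → Int) (a : Int) :
    l.foldl (fun acc x => if p x then acc + g x else acc) a
      = a + ((l.filter (fun x => decide (p x))).map g).sum := by
  induction l generalizing a with
  | nil => simp
  | cons x l ih =>
    by_cases h : p x <;> simp [h, ih]
    ring

-- ===== VERDICT (by name: the statement is the Claim_ definition above) =====
theorem find_alignments_spec : Claim_equal_find_alignments := by
  intro screen _
  unfold Spec_find_alignments find_alignments find_alignments_alt
  simp only [nbrs_A]
  rw [PySem.List.foldl_append_ite_eq_filter, foldl_if_add]
  rw [← PySem.List.dedup_eq_ofList]
  simp only [List.nil_append, Int.zero_add]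
  congr 1
  congr 1
  apply List.filter_congr
  intro s hs
  rw [count_spec, PySem.Dict.getD_empty]
  rw [PySem.List.dedup_eq_ofList, inter_length]
  have hcongr : ∀ (L : List (Int × Int)), L.countP (fun t => decide (t ∈ nbrsOf s))
      = L.countP (fun t => decide (s ∈ nbrsOf t)) := fun L => by
    apply List.countP_congr
    intro t _
    simp [nbrs_symm]
  rw [hcongr]
  rw [← PySem.List.dedup_eq_ofList]
  set k := (PySem.List.dedup (screen.map (fun e => (e.1, e.2.1)))).countP
      (fun t => decide (s ∈ nbrsOf t)) with hk
  simp only [decide_eq_decide]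
  omega
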